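-- pv_equiv track=rewrite | github.com/ilovemyminutes/problem-solving | naver-webtoon-20210704/01.py | solution
-- ===== SOURCE A (Python) =====
-- from collections import defaultdict
--
-- def solution(lottery):
--     logs = defaultdict(int)
--     win_experiences = dict() # 당첨 경험자
--     for user_id, result in lottery:
--         if user_id not in win_experiences:
--             logs[user_id] += 1
--
--         if result == 1:
--             win_experiences[user_id] = True
--
--     if not win_experiences:
--         answer = 0
--     else:
--         answer = int(sum(logs.values()) / len(logs))
--
--     return answer
-- ===== SOURCE B (Python) =====
-- def solution(lottery):
--     # Group each user's results, then score each group once: index of the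
--     # first win + 1 if the user ever won, else the full group length.
--     groups = {}
--     for user_id, result in lottery:
--         groups.setdefault(user_id, []).append(result)
--     total = 0
--     any_win = False
--     for results in groups.values():
--         won_at = None
--         for i, r in enumerate(results):
--             if r == 1:
--                 won_at = i + 1
--                 break
--         if won_at is None:
--             total += len(results)
--         else:
--             total += won_at
--             any_win = True
--     if not any_win:
--         return 0
--     return total // len(groups)
-- ===== Notes on version B (the rewrite author's own statement) =====
-- stated objective: alternative
-- what changed: Instead of one interleaved pass maintaining a counting dict and a winners dict, B groups each user's results into lists in one pass and then scores each group independently (first-win index + 1, or full length), dividing by the number of groups with // instead of int(/).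
import Mathlib
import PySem

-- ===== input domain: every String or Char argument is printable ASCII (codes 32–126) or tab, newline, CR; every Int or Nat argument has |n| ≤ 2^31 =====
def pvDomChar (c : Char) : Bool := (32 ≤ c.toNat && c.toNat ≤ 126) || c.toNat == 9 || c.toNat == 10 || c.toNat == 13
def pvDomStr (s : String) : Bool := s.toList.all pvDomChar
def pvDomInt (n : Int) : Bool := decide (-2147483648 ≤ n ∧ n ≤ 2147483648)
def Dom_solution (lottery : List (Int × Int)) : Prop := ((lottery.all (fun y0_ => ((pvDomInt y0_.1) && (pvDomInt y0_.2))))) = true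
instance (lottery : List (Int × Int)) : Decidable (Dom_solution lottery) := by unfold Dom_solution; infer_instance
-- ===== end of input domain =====

-- B groups results per user and scores each group independently instead of A's
-- interleaved counting/winner dicts; same cost, different decomposition.

-- ===== PORT A =====
-- int(sum/len) is ported as PySem.Int.truncdiv, exact for |operands| < 2^53.
def solution (lottery : List (Int × Int)) : Int :=
  let st := lottery.foldl
    (fun (st : PySem.Dict Int Int × PySem.Dict Int Bool) p =>
      let logs := if st.2.contains p.1 then st.1 else st.1.modify p.1 0 (· + 1)
      let wins := if p.2 = 1 then st.2.insert p.1 true else st.2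
      (logs, wins))
    (PySem.Dict.empty, PySem.Dict.empty)
  if st.2.size = 0 then 0
  else PySem.Int.truncdiv (st.1.values.foldl (· + ·) 0) st.1.size

-- ===== PORT B =====
-- inner 'for i, r in enumerate(results): if r == 1: won_at = i+1; break'
def scanGroup : List Int → Option Int
  | [] => none
  | r :: rest => if r = 1 then some 1 else (scanGroup rest).map (· + 1)

def solution_alt (lottery : List (Int × Int)) : Int :=
  let groups := lottery.foldl
    (fun (d : PySem.Dict Int (List Int)) p => d.modify p.1 [] (· ++ [p.2]))
    PySem.Dict.empty
  let st := groups.values.foldl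
    (fun (st : Int × Bool) rs =>
      match scanGroup rs with
      | none => (st.1 + (rs.length : Int), st.2)
      | some c => (st.1 + c, true))
    (0, false)
  if st.2 then PySem.Int.floordiv st.1 groups.size else 0

-- ===== PRECONDITION & SPEC =====
def Spec_solution (lottery : List (Int × Int)) (out : Int) : Prop := out = solution_alt lottery
instance (lottery : List (Int × Int)) (out : Int) : Decidable (Spec_solution lottery out) := by unfold Spec_solution; infer_instance

-- ===== CLAIM (what is proved, stated in full; the proofs are below) =====
def Claim_equal_solution : Prop := ∀ (lottery : List (Int × Int)), Dom_solution lottery → Spec_solution lottery (solution lottery)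

-- ===== LEMMAS AND PROOFS =====

-- results of user k, in order
def rsOf (l : List (Int × Int)) (k : Int) : List Int :=
  (l.filter (fun p => p.1 == k)).map (·.2)

-- attempts counted by A for one user: first-win index + 1, or full length
def cnt : List Int → Int
  | [] => 0
  | r :: t => if r = 1 then 1 else 1 + cnt t

lemma rsOf_cons (p : Int × Int) (t : List (Int × Int)) (k : Int) :
    rsOf (p :: t) k = if p.1 = k then p.2 :: rsOf t k else rsOf t k := by
  simp only [rsOf, List.filter_cons]
  by_cases h : p.1 = k <;> simp [h]

lemma cnt_nonneg (rs : List Int) : 0 ≤ cnt rs := by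
  induction rs with
  | nil => simp [cnt]
  | cons r t ih => simp only [cnt]; split_ifs <;> omega

lemma scanGroup_cnt (rs : List Int) :
    cnt rs = match scanGroup rs with
             | none => (rs.length : Int)
             | some c => c := by
  induction rs with
  | nil => simp [cnt, scanGroup]
  | cons r t ih =>
    simp only [cnt, scanGroup]
    by_cases h : r = 1
    · simp [h]
    · rw [if_neg h, if_neg h]
      cases hs : scanGroup t <;> rw [hs] at ih <;> simp [ih, Option.map] <;> ring

lemma scanGroup_isSome (rs : List Int) : (scanGroup rs).isSome = rs.contains 1 := by
  induction rs with
  | nil => simp [scanGroup]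
  | cons r t ih =>
    simp only [scanGroup, List.contains_cons]
    by_cases h : r = 1
    · simp [h]
    · rw [if_neg h]
      have h1 : (1 == r) = false := beq_eq_false_iff_ne.mpr (fun e => h e.symm)
      cases hs : scanGroup t <;> rw [hs] at ih <;>
        simp only [Option.map_none, Option.map_some, Option.isSome_none,
          Option.isSome_some, h1, Bool.false_or] at ih ⊢ <;> exact ih

-- A's loop step, named for the proofs (definitionally the port's lambda)
def stepA (st : PySem.Dict Int Int × PySem.Dict Int Bool) (p : Int × Int) :
    PySem.Dict Int Int × PySem.Dict Int Bool :=
  let logs := if st.2.contains p.1 then st.1 else st.1.modify p.1 0 (· + 1)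
  let wins := if p.2 = 1 then st.2.insert p.1 true else st.2
  (logs, wins)

lemma stepA_eq :
    (fun (st : PySem.Dict Int Int × PySem.Dict Int Bool) (p : Int × Int) =>
      let logs := if st.2.contains p.1 then st.1 else st.1.modify p.1 0 (· + 1)
      let wins := if p.2 = 1 then st.2.insert p.1 true else st.2
      (logs, wins)) = stepA := rfl

lemma set_add_of_contains {s : PySem.Set Int} {x : Int} (h : s.contains x = true) :
    s.add x = s := by rw [PySem.Set.add, if_pos h]

lemma keys_insert_add {v : Type} (w : PySem.Dict Int v) (u : Int) (x : v) :
    (w.insert u x).keys = PySem.Set.add w.keys u := by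
  by_cases hc : w.contains u
  · rw [PySem.Dict.keys_insert_of_contains _ _ hc,
      set_add_of_contains (List.contains_iff_mem.mpr ((PySem.Dict.contains_iff_mem_keys w u).mp hc))]
  · have hc' : w.contains u = false := eq_false_of_ne_true hc
    rw [PySem.Dict.keys_insert_of_not_contains _ _ hc', PySem.Set.add, if_neg]
    intro hmem
    exact absurd ((PySem.Dict.contains_iff_mem_keys w u).mpr (List.contains_iff_mem.mp hmem))
      (by simp [hc'])

-- A's loop invariant: keys, per-key counts, and winner keys after the fold
lemma foldA_inv (l : List (Int × Int)) :
    ∀ (d : PySem.Dict Int Int) (w : PySem.Dict Int Bool),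
    d.keys.Nodup →
    (∀ k, w.contains k = true → d.contains k = true) →
    ((l.foldl stepA (d, w)).1.keys = PySem.Set.update d.keys (l.map (·.1)))
    ∧ (l.foldl stepA (d, w)).1.keys.Nodup
    ∧ (∀ k, (l.foldl stepA (d, w)).1.getD k 0
        = d.getD k 0 + (if w.contains k then 0 else cnt (rsOf l k)))
    ∧ ((l.foldl stepA (d, w)).2.keys
        = PySem.Set.update w.keys ((l.filter (fun p => p.2 == 1)).map (·.1))) := by
  induction l with
  | nil =>
    intro d w hnd hwd
    simp [PySem.Set.update_nil, rsOf, cnt, hnd]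
  | cons p t ih =>
    intro d w hnd hwd
    have hst : List.foldl stepA (d, w) (p :: t)
        = List.foldl stepA
            ((if w.contains p.1 then d else d.modify p.1 0 (· + 1)),
             (if p.2 = 1 then w.insert p.1 true else w)) t := by
      rw [List.foldl_cons]; rfl
    set d' := if w.contains p.1 then d else d.modify p.1 0 (· + 1) with hd'
    set w' := if p.2 = 1 then w.insert p.1 true else w with hw'
    -- keys of d' are d.keys with p.1 added
    have hk' : d'.keys = PySem.Set.add d.keys p.1 := by
      rw [hd']
      by_cases hw1 : w.contains p.1
      · rw [if_pos hw1,
          set_add_of_contains (List.contains_iff_mem.mpr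
            ((PySem.Dict.contains_iff_mem_keys d p.1).mp (hwd _ hw1)))]
      · rw [if_neg hw1, PySem.Dict.keys_modify, keys_insert_add]
    have hnd' : d'.keys.Nodup := hk' ▸ PySem.Set.nodup_add _ _ hnd
    have hdc : ∀ k, d.contains k = true → d'.contains k = true := by
      intro k hk
      rw [hd']; by_cases hw1 : w.contains p.1
      · rwa [if_pos hw1]
      · rw [if_neg hw1, PySem.Dict.contains_modify, hk, Bool.or_true]
    have hd'p : d'.contains p.1 = true := by
      rw [hd']; by_cases hw1 : w.contains p.1
      · rw [if_pos hw1]; exact hwd _ hw1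
      · rw [if_neg hw1, PySem.Dict.contains_modify]; simp
    have hwd' : ∀ k, w'.contains k = true → d'.contains k = true := by
      intro k hk
      rw [hw'] at hk
      by_cases hr : p.2 = 1
      · rw [if_pos hr, PySem.Dict.contains_insert] at hk
        rcases Bool.or_eq_true_iff.mp hk with h | h
        · exact (eq_of_beq h) ▸ hd'p
        · exact hdc _ (hwd _ h)
      · rw [if_neg hr] at hk
        exact hdc _ (hwd _ hk)
    obtain ⟨ih1, ih2, ih3, ih4⟩ := ih d' w' hnd' hwd'
    rw [hst]
    refine ⟨?_, ih2, ?_, ?_⟩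
    · rw [ih1, hk', List.map_cons, PySem.Set.update_cons]
    · intro k
      rw [ih3 k, rsOf_cons]
      by_cases hpk : p.1 = k
      · subst hpk
        rw [if_pos rfl]
        by_cases hw1 : w.contains p.1
        · have hde : d' = d := by rw [hd', if_pos hw1]
          have hw'c : w'.contains p.1 = true := by
            rw [hw']; by_cases hr : p.2 = 1
            · rw [if_pos hr, PySem.Dict.contains_insert]; simp
            · rwa [if_neg hr]
          rw [hde, hw'c, hw1]; simp
        · have hde : d'.getD p.1 0 = d.getD p.1 0 + 1 := by
            rw [hd', if_neg hw1, PySem.Dict.getD_modify_self]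
          rw [if_neg hw1, hde]
          by_cases hr : p.2 = 1
          · have hw'c : w'.contains p.1 = true := by
              rw [hw', if_pos hr, PySem.Dict.contains_insert]; simp
            rw [hw'c, if_pos rfl]
            simp [cnt, hr]
          · have hw'c : w'.contains p.1 = false := by rw [hw', if_neg hr]; exact eq_false_of_ne_true hw1
            rw [hw'c]
            simp only [if_false, Bool.false_eq_true, cnt, if_neg hr]
            ring
      · have hge : d'.getD k 0 = d.getD k 0 := by
          rw [hd']; by_cases hw1 : w.contains p.1
          · rw [if_pos hw1]
          · rw [if_neg hw1, PySem.Dict.getD_modify_of_ne _ _ _ (fun e => hpk e.symm)]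
        have hce : w'.contains k = w.contains k := by
          rw [hw']; by_cases hr : p.2 = 1
          · rw [if_pos hr, PySem.Dict.contains_insert,
              beq_eq_false_iff_ne.mpr (fun e => hpk e.symm), Bool.false_or]
          · rw [if_neg hr]
        rw [hge, hce, if_neg hpk]
    · rw [ih4, hw']
      by_cases hr : p.2 = 1
      · rw [if_pos hr, keys_insert_add, List.filter_cons_of_pos (by simp [hr]),
          List.map_cons, PySem.Set.update_cons]
      · rw [if_neg hr, List.filter_cons_of_neg (by simp [hr])]

-- B's scoring loop, characterised
lemma foldB_char (vs : List (List Int)) (t : Int) (b : Bool) :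
    vs.foldl
      (fun (st : Int × Bool) rs =>
        match scanGroup rs with
        | none => (st.1 + (rs.length : Int), st.2)
        | some c => (st.1 + c, true)) (t, b)
    = (t + (vs.map cnt).sum, b || vs.any (fun rs => rs.contains 1)) := by
  induction vs generalizing t b with
  | nil => simp
  | cons rs vs ih =>
    have hc := scanGroup_cnt rs
    have hi := scanGroup_isSome rs
    simp only [List.foldl_cons, List.map_cons, List.sum_cons, List.any_cons]
    cases hs : scanGroup rs <;> rw [hs] at hc hi
    · simp only [Option.isSome_none] at hi
      rw [ih, hc, ← hi]
      simp [add_assoc]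
    · simp only [Option.isSome_some] at hi
      rw [ih, hc, ← hi]
      simp [add_assoc]

-- sum loop of A
lemma foldl_add_int (xs : List Int) (t : Int) : xs.foldl (· + ·) t = t + xs.sum := by
  induction xs generalizing t with
  | nil => simp
  | cons x xs ih => simp [ih, add_assoc]

lemma winners_empty_iff (l : List (Int × Int)) :
    ((l.filter (fun p => p.2 == 1)).map (·.1) = []) ↔ ∀ p ∈ l, p.2 ≠ 1 := by
  simp [List.map_eq_nil_iff, List.filter_eq_nil_iff]

lemma any_key_win (l : List (Int × Int)) :
    ((PySem.Set.ofList (l.map (·.1))).any (fun k => (rsOf l k).contains 1))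
      = !decide (∀ p ∈ l, p.2 ≠ 1) := by
  rw [Bool.eq_iff_iff]
  simp only [List.any_eq_true, PySem.Set.mem_ofList, List.contains_iff_mem,
    Bool.not_eq_eq_eq_not, Bool.not_true, decide_eq_false_iff_not, not_forall]
  constructor
  · rintro ⟨k, -, hm⟩
    rcases List.mem_map.mp hm with ⟨q, hq, h2⟩
    rcases List.mem_filter.mp hq with ⟨hql, -⟩
    exact ⟨q, hql, fun hne => hne h2⟩
  · rintro ⟨q, hql, h1⟩
    have hq2 : q.2 = 1 := not_not.mp (fun h => h1 (fun e => h e))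
    refine ⟨q.1, List.mem_map.mpr ⟨q, hql, rfl⟩, ?_⟩
    exact List.mem_map.mpr ⟨q, List.mem_filter.mpr ⟨hql, by simp⟩, hq2⟩


-- ===== VERDICT (by name: the statement is the Claim_ definition above) =====
theorem solution_spec : Claim_equal_solution := by
  intro l _
  unfold Spec_solution solution solution_alt
  simp only [stepA_eq]
  -- A-side invariant, from the empty dicts
  obtain ⟨h1, h2, h3, h4⟩ := foldA_inv l PySem.Dict.empty PySem.Dict.empty
    (by rw [PySem.Dict.keys_empty]; exact List.nodup_nil)
    (fun k h => by rw [PySem.Dict.contains_empty] at h; cases h)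
  rw [foldB_char]
  -- groups facts
  have hG : ∀ k, (l.foldl
      (fun (d : PySem.Dict Int (List Int)) p => d.modify p.1 [] (· ++ [p.2]))
      PySem.Dict.empty).getD k [] = rsOf l k := by
    intro k
    rw [PySem.Dict.getD_foldl_modify_append, PySem.Dict.getD_empty]
    simp [rsOf]
  have hGK : (l.foldl
      (fun (d : PySem.Dict Int (List Int)) p => d.modify p.1 [] (· ++ [p.2]))
      PySem.Dict.empty).keys = PySem.Set.ofList (l.map (·.1)) := by
    have := PySem.Dict.keys_foldl_modify_key l (fun p => p.1) ([] : List Int)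
      (fun _ p v => v ++ [p.2]) PySem.Dict.empty
    simpa [PySem.Dict.keys_empty, PySem.Set.update_empty] using this
  have hGN : (l.foldl
      (fun (d : PySem.Dict Int (List Int)) p => d.modify p.1 [] (· ++ [p.2]))
      PySem.Dict.empty).keys.Nodup := by
    have := PySem.Dict.nodup_keys_foldl_modify_key l (fun p => p.1) ([] : List Int)
      (fun _ p v => v ++ [p.2]) PySem.Dict.empty
      (by rw [PySem.Dict.keys_empty]; exact List.nodup_nil)
    simpa using this
  -- both keys lists are the distinct users
  have hAK : (l.foldl stepA (PySem.Dict.empty, PySem.Dict.empty)).1.keys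
      = PySem.Set.ofList (l.map (·.1)) := by
    rw [h1, PySem.Dict.keys_empty]
    exact PySem.Set.update_empty _
  -- both value lists enumerate cnt ∘ rsOf over the distinct users
  have hAV : (l.foldl stepA (PySem.Dict.empty, PySem.Dict.empty)).1.values
      = (PySem.Set.ofList (l.map (·.1))).map (fun k => cnt (rsOf l k)) := by
    rw [PySem.Dict.values_eq_map_keys _ h2 0, hAK]
    refine List.map_congr_left (fun k _ => ?_)
    rw [h3 k, PySem.Dict.getD_empty, PySem.Dict.contains_empty]
    simp
  have hBV : (l.foldl
      (fun (d : PySem.Dict Int (List Int)) p => d.modify p.1 [] (· ++ [p.2]))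
      PySem.Dict.empty).values
      = (PySem.Set.ofList (l.map (·.1))).map (fun k => rsOf l k) := by
    rw [PySem.Dict.values_eq_map_keys _ hGN [], hGK]
    exact List.map_congr_left (fun k _ => hG k)
  have hsize : ∀ {ν : Type} (d : PySem.Dict Int ν), d.size = d.keys.length := by
    intro ν d; simp [PySem.Dict.size, PySem.Dict.keys]
  have hW2 : (l.foldl stepA (PySem.Dict.empty, PySem.Dict.empty)).2.keys
      = PySem.Set.ofList ((l.filter (fun p => p.2 == 1)).map (·.1)) := by
    rw [h4, PySem.Dict.keys_empty]
    exact PySem.Set.update_empty _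
  rw [hAV, hBV, foldl_add_int, List.map_map, List.any_map]
  simp only [hsize, hAK, hGK, hW2]
  have hany : ((PySem.Set.ofList (l.map (·.1))).any
      (fun k => (rsOf l k).contains 1)) = !decide (∀ p ∈ l, p.2 ≠ 1) := any_key_win l
  by_cases hwin : ∀ p ∈ l, p.2 ≠ 1
  · have hwe : (l.filter (fun p => p.2 == 1)).map (·.1) = [] := (winners_empty_iff l).mpr hwin
    rw [hwe]
    have hcomp : ((fun rs : List Int => rs.contains 1) ∘ fun k => rsOf l k)
        = fun k => (rsOf l k).contains 1 := rfl
    rw [hcomp, hany, decide_eq_true hwin]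
    simp
  · have hne : (l.filter (fun p => p.2 == 1)).map (·.1) ≠ [] :=
      fun h => hwin ((winners_empty_iff l).mp h)
    have hKne : (PySem.Set.ofList (l.map (·.1))) ≠ [] := by
      rcases not_forall.mp hwin with ⟨q, hq⟩
      rcases Classical.not_imp.mp hq with ⟨hql, h1q⟩
      intro hK
      exact absurd (hK ▸ (PySem.Set.mem_ofList (l.map (fun p : Int × Int => p.1)) q.1).mpr
        (List.mem_map.mpr ⟨q, hql, rfl⟩)) (List.not_mem_nil)
    have hlen0 : (PySem.Set.ofList ((l.filter (fun p => p.2 == 1)).map (·.1))).length ≠ 0 := by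
      intro h0
      apply hne
      have hemp := List.length_eq_zero_iff.mp h0
      refine List.eq_nil_iff_forall_not_mem.mpr (fun x hx => ?_)
      exact absurd (hemp ▸ (PySem.Set.mem_ofList _ x).mpr hx) (List.not_mem_nil)
    rw [if_neg hlen0]
    have hcomp : ((fun rs : List Int => rs.contains 1) ∘ fun k => rsOf l k)
        = fun k => (rsOf l k).contains 1 := rfl
    rw [hcomp, hany, decide_eq_false hwin]
    simp only [Bool.not_false, Bool.or_true]
    have hS : 0 ≤ 0 + ((PySem.Set.ofList (l.map (·.1))).map (fun k => cnt (rsOf l k))).sum := by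
      have := List.sum_nonneg (l := (PySem.Set.ofList (l.map (·.1))).map (fun k => cnt (rsOf l k)))
        (fun x hx => by rcases List.mem_map.mp hx with ⟨k, -, hk⟩; exact hk ▸ cnt_nonneg _)
      omega
    have hn : (0 : Int) < ((PySem.Set.ofList (l.map (·.1))).length : Int) := by
      have : (PySem.Set.ofList (l.map (·.1))).length ≠ 0 :=
        fun h => hKne (List.length_eq_zero_iff.mp h)
      omega
    rw [PySem.Int.truncdiv, PySem.Int.floordiv,
      Int.tdiv_eq_ediv_of_nonneg hS, Int.fdiv_eq_ediv_of_nonneg _ (le_of_lt hn)]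
    have hc2 : (cnt ∘ fun k => rsOf l k) = fun k => cnt (rsOf l k) := rfl
    rw [hc2]
    simp
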